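-- pv_equiv track=rewrite | github.com/ShaikAbdulAzizGit/Python-Realworld-Practice | automation_scripting_practice.py | analyze_log_levels
-- ===== SOURCE A (Python) =====
-- def analyze_log_levels(log_messages):
--     info_messages_count=0
--     error_messages_count=0
--     warning_messages_count=0
--     debug_messages_count=0
--     for message in log_messages:
--         if "INFO" in message:
--             info_messages_count+=1
--         elif  "ERROR" in message:
--             error_messages_count+=1
--         elif "WARNING" in message:
--             warning_messages_count+=1
--         elif "DEBUG" in message:
--             debug_messages_count+=1
--
--
--     return info_messages_count,error_messages_count,warning_messages_count,debug_messages_count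
-- ===== SOURCE B (Python) =====
-- LEVELS = ["INFO", "ERROR", "WARNING", "DEBUG"]
--
-- def _first_level(message):
--     return next((lv for lv in LEVELS if lv in message), None)
--
-- def analyze_log_levels(log_messages):
--     labels = [_first_level(m) for m in log_messages]
--     return tuple(labels.count(lv) for lv in LEVELS)
-- ===== Notes on version B (the rewrite author's own statement) =====
-- stated objective: idiomatic
-- what changed: Replaced the four running counters and the if/elif chain by a classify-then-count structure: each message is mapped to its first matching level via a single lookup over an ordered LEVELS list, and the tuple is produced by counting labels per level.
import Mathlib
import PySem

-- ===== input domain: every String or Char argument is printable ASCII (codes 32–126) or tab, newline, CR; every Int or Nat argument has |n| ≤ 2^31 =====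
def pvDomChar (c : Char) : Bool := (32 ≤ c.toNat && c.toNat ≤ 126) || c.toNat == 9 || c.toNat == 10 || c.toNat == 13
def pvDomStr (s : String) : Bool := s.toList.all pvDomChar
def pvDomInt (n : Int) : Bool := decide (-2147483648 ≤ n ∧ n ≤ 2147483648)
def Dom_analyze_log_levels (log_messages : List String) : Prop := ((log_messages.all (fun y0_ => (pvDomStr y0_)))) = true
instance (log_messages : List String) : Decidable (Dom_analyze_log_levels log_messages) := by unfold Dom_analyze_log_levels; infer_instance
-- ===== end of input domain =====

-- ===== PORT A =====
-- B classifies each message to its first matching level and counts labels, instead of A's if/elif chain over four running counters (idiomatic restructuring, same cost).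
def analyze_log_levels (log_messages : List String) : Int × Int × Int × Int :=
  log_messages.foldl
    (fun (acc : Int × Int × Int × Int) message =>
      if PySem.Str.isIn "INFO" message then (acc.1 + 1, acc.2.1, acc.2.2.1, acc.2.2.2)
      else if PySem.Str.isIn "ERROR" message then (acc.1, acc.2.1 + 1, acc.2.2.1, acc.2.2.2)
      else if PySem.Str.isIn "WARNING" message then (acc.1, acc.2.1, acc.2.2.1 + 1, acc.2.2.2)
      else if PySem.Str.isIn "DEBUG" message then (acc.1, acc.2.1, acc.2.2.1, acc.2.2.2 + 1)
      else acc)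
    (0, 0, 0, 0)

-- ===== PORT B =====
def pvLEVELS : List String := ["INFO", "ERROR", "WARNING", "DEBUG"]

def pvFirstLevel (message : String) : Option String :=
  pvLEVELS.find? (fun lv => PySem.Str.isIn lv message)

def analyze_log_levels_alt (log_messages : List String) : Int × Int × Int × Int :=
  let labels := log_messages.map pvFirstLevel
  ((PySem.List.count labels (some "INFO") : Int),
   (PySem.List.count labels (some "ERROR") : Int),
   (PySem.List.count labels (some "WARNING") : Int),
   (PySem.List.count labels (some "DEBUG") : Int))

-- ===== PRECONDITION & SPEC =====
def Spec_analyze_log_levels (log_messages : List String) (out : Int × Int × Int × Int) : Prop := out = analyze_log_levels_alt log_messages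
instance (log_messages : List String) (out : Int × Int × Int × Int) : Decidable (Spec_analyze_log_levels log_messages out) := by unfold Spec_analyze_log_levels; infer_instance

-- ===== CLAIM (what is proved, stated in full; the proofs are below) =====
def Claim_equal_analyze_log_levels : Prop := ∀ (log_messages : List String), Dom_analyze_log_levels log_messages → Spec_analyze_log_levels log_messages (analyze_log_levels log_messages)

-- ===== LEMMAS AND PROOFS =====
theorem pvFirstLevel_eq (m : String) :
    pvFirstLevel m =
      if PySem.Str.isIn "INFO" m then some "INFO"
      else if PySem.Str.isIn "ERROR" m then some "ERROR"
      else if PySem.Str.isIn "WARNING" m then some "WARNING"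
      else if PySem.Str.isIn "DEBUG" m then some "DEBUG"
      else none := by
  simp only [pvFirstLevel, pvLEVELS, List.find?_cons, List.find?_nil]
  cases PySem.Str.isIn "INFO" m <;> cases PySem.Str.isIn "ERROR" m <;>
    cases PySem.Str.isIn "WARNING" m <;> cases PySem.Str.isIn "DEBUG" m <;> simp

theorem pv_fold_eq (msgs : List String) (a b c d : Int) :
    msgs.foldl
      (fun (acc : Int × Int × Int × Int) message =>
        if PySem.Str.isIn "INFO" message then (acc.1 + 1, acc.2.1, acc.2.2.1, acc.2.2.2)
        else if PySem.Str.isIn "ERROR" message then (acc.1, acc.2.1 + 1, acc.2.2.1, acc.2.2.2)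
        else if PySem.Str.isIn "WARNING" message then (acc.1, acc.2.1, acc.2.2.1 + 1, acc.2.2.2)
        else if PySem.Str.isIn "DEBUG" message then (acc.1, acc.2.1, acc.2.2.1, acc.2.2.2 + 1)
        else acc)
      (a, b, c, d)
    = (a + (PySem.List.count (msgs.map pvFirstLevel) (some "INFO") : Int),
       b + (PySem.List.count (msgs.map pvFirstLevel) (some "ERROR") : Int),
       c + (PySem.List.count (msgs.map pvFirstLevel) (some "WARNING") : Int),
       d + (PySem.List.count (msgs.map pvFirstLevel) (some "DEBUG") : Int)) := by
  induction msgs generalizing a b c d with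
  | nil => simp [PySem.List.count]
  | cons m rest ih =>
    rw [List.foldl_cons, List.map_cons, pvFirstLevel_eq]
    cases hI : PySem.Str.isIn "INFO" m <;>
      cases hE : PySem.Str.isIn "ERROR" m <;>
        cases hW : PySem.Str.isIn "WARNING" m <;>
          cases hD : PySem.Str.isIn "DEBUG" m <;>
            simp only [if_true, if_false, Bool.false_eq_true] <;>
            rw [ih] <;>
            simp [PySem.List.count_eq] <;> omega

-- ===== VERDICT (by name: the statement is the Claim_ definition above) =====
theorem analyze_log_levels_spec : Claim_equal_analyze_log_levels := by
  intro msgs _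
  unfold Spec_analyze_log_levels analyze_log_levels analyze_log_levels_alt
  rw [pv_fold_eq]
  simp
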